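-- pv_equiv track=rewrite | github.com/sfrieson/subway | schedule/controllers/route.py | get_longest_contiguous_path
-- ===== SOURCE A (Python) =====
-- def get_longest_contiguous_path(path):
--     max_length = 1
--     max_start = 0
--     max_end = 0
--     sequence = 1
--
--     start = 0
--     end = 0
--     length = 1
--     for i, point in enumerate(path):
--         if i + 1 != len(path) and point[sequence] + 1 == path[i + 1][sequence]:
--             length += 1
--             end = i + 1
--         else:
--             if length > max_length:
--                 max_length = length
--                 max_start = start
--                 max_end = end
--             start = i + 1
--             end = i + 1
--             length = 1
--
--     return path[max_start:max_end + 1]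
-- ===== SOURCE B (Python) =====
-- def get_longest_contiguous_path(path):
--     if not path:
--         return []
--     i = 1
--     while i < len(path) and path[i][1] == path[i - 1][1] + 1:
--         i += 1
--     head, rest = path[:i], path[i:]
--     best_rest = get_longest_contiguous_path(rest)
--     return best_rest if len(best_rest) > len(head) else head
-- ===== Notes on version B (the rewrite author's own statement) =====
-- stated objective: alternative
-- what changed: Replaces A's single-pass enumerate/counter state machine (tracking max_length/max_start/max_end plus current run counters and returning a slice) with a recursive decomposition that peels the first maximal +1-run and keeps it unless the recursive best of the remainder is strictly longer, reproducing A's first-longest-wins tie rule.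
import Mathlib
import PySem

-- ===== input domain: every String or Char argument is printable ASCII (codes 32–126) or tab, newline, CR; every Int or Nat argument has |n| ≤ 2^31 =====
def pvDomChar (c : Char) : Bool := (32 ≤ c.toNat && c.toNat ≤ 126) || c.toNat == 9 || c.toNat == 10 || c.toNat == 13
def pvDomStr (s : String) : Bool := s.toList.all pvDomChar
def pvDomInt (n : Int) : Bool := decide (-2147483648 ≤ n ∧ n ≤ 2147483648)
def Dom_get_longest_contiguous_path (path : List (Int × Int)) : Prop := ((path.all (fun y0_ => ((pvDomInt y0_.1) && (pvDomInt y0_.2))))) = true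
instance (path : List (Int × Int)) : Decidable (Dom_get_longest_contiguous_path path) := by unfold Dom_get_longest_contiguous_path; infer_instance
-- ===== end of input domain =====

-- B re-implements A by a different decomposition: A runs an index-based counter state machine over
-- enumerate(path); B recursively peels the first maximal +1-run and keeps the longer of it and the
-- recursive best of the rest (first-longest wins, as in A).  Same return value on every input.

-- ===== PORT A =====
-- loop body of A: state (max_length, max_start, max_end, start, end, length), (i, point) from enumerate(path)
def pvStepA (path : List (Int × Int)) (n : Int)
    (st : Int × Int × Int × Int × Int × Int) (ip : Int × (Int × Int)) :
    Int × Int × Int × Int × Int × Int :=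
  let (maxLen, maxStart, maxEnd, start, e, len) := st
  let i := ip.1
  let point := ip.2
  if (i + 1 != n) &&
     (match PySem.List.pyGet? path (i + 1) with
      | some q => point.2 + 1 == q.2
      | none => false) then
    (maxLen, maxStart, maxEnd, start, i + 1, len + 1)
  else
    if len > maxLen then
      (len, start, e, i + 1, i + 1, 1)
    else
      (maxLen, maxStart, maxEnd, i + 1, i + 1, 1)

def get_longest_contiguous_path (path : List (Int × Int)) : List (Int × Int) :=
  let st := (PySem.List.enumerate path 0).foldl (pvStepA path (path.length : Int)) (1, 0, 0, 0, 0, 1)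
  PySem.List.slice path (some st.2.1) (some (st.2.2.1 + 1))

-- ===== PORT B =====
-- the while-loop of Source B: i ends at 1 + pvRunLen p.2 ps, the length of the maximal +1-chain after p
def pvRunLen (prev : Int) : List (Int × Int) → Nat
  | [] => 0
  | q :: qs => if q.2 == prev + 1 then 1 + pvRunLen q.2 qs else 0

def get_longest_contiguous_path_alt : List (Int × Int) → List (Int × Int)
  | [] => []
  | p :: ps =>
    let i := 1 + pvRunLen p.2 ps
    let best := get_longest_contiguous_path_alt ((p :: ps).drop i)
    if best.length > ((p :: ps).take i).length then best else (p :: ps).take i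
termination_by l => l.length
decreasing_by simp

-- ===== PRECONDITION & SPEC =====
def Spec_get_longest_contiguous_path (path : List (Int × Int)) (out : List (Int × Int)) : Prop := out = get_longest_contiguous_path_alt path
instance (path : List (Int × Int)) (out : List (Int × Int)) : Decidable (Spec_get_longest_contiguous_path path out) := by unfold Spec_get_longest_contiguous_path; infer_instance

-- ===== CLAIM (what is proved, stated in full; the proofs are below) =====
def Claim_equal_get_longest_contiguous_path : Prop := ∀ (path : List (Int × Int)), Dom_get_longest_contiguous_path path → Spec_get_longest_contiguous_path path (get_longest_contiguous_path path)

-- ===== LEMMAS AND PROOFS =====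

-- (offset, length) of the first maximal contiguous run, following B's peeling recursion
def pvBestRun : List (Int × Int) → Nat × Nat
  | [] => (0, 0)
  | p :: ps =>
    let L := 1 + pvRunLen p.2 ps
    let r := pvBestRun ((p :: ps).drop L)
    if r.2 > L then (L + r.1, r.2) else (0, L)
termination_by l => l.length
decreasing_by simp

-- local reformulation of A's loop: same state machine, next-element test read off the list itself
def pvClose (i : Int) (st : Int × Int × Int × Int × Int × Int) : Int × Int × Int × Int × Int × Int :=
  if st.2.2.2.2.2 > st.1 then (st.2.2.2.2.2, st.2.2.2.1, st.2.2.2.2.1, i + 1, i + 1, 1)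
  else (st.1, st.2.1, st.2.2.1, i + 1, i + 1, 1)

def pvLoopL (i : Int) : List (Int × Int) → (Int × Int × Int × Int × Int × Int) → Int × Int × Int × Int × Int × Int
  | [], st => st
  | [_], st => pvClose i st
  | p :: q :: qs, st =>
      if p.2 + 1 = q.2 then
        pvLoopL (i + 1) (q :: qs) (st.1, st.2.1, st.2.2.1, st.2.2.2.1, i + 1, st.2.2.2.2.2 + 1)
      else
        pvLoopL (i + 1) (q :: qs) (pvClose i st)

def pvFst3 (st : Int × Int × Int × Int × Int × Int) : Int × Int × Int := (st.1, st.2.1, st.2.2.1)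

lemma pvRunLen_le (prev : Int) (l : List (Int × Int)) : pvRunLen prev l ≤ l.length := by
  induction l generalizing prev with
  | nil => simp [pvRunLen]
  | cons q qs ih =>
    simp only [pvRunLen, List.length_cons]
    split
    · have := ih q.2; omega
    · omega

lemma pvBestRun_bounds (l : List (Int × Int)) : (pvBestRun l).1 + (pvBestRun l).2 ≤ l.length := by
  induction l using pvBestRun.induct with
  | case1 => simp [pvBestRun]
  | case2 q qs L r hgt ih =>
    have hr := pvRunLen_le q.2 qs
    simp only [L, r, List.length_drop, List.length_cons] at hgt ih
    simp only [pvBestRun]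
    split
    · simp only [List.length_cons]; omega
    · omega
  | case3 q qs L r hle ih =>
    have hr := pvRunLen_le q.2 qs
    simp only [L, r, List.length_drop, List.length_cons] at hle ih
    simp only [pvBestRun]
    split
    · omega
    · simp only [List.length_cons]; omega

lemma bestRun_len_pos (p : Int × Int) (ps : List (Int × Int)) : 1 ≤ (pvBestRun (p :: ps)).2 := by
  simp only [pvBestRun]
  split
  · omega
  · simp

lemma bestRun_off_zero_of_len_one (p : Int × Int) (ps : List (Int × Int)) :
    (pvBestRun (p :: ps)).2 ≤ 1 → (pvBestRun (p :: ps)).1 = 0 := by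
  simp only [pvBestRun]
  split
  · intro h; omega
  · intro _; rfl

lemma alt_eq_bestRun (l : List (Int × Int)) :
    get_longest_contiguous_path_alt l = (l.drop (pvBestRun l).1).take (pvBestRun l).2 := by
  induction l using pvBestRun.induct with
  | case1 => simp [pvBestRun, get_longest_contiguous_path_alt]
  | case2 q qs L r hgt ih =>
    have hb := pvBestRun_bounds ((q :: qs).drop (1 + pvRunLen q.2 qs))
    have hr := pvRunLen_le q.2 qs
    simp only [L, r] at hgt ih
    simp only [get_longest_contiguous_path_alt, pvBestRun, if_pos hgt, ih]
    rw [if_pos]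
    · rw [List.drop_drop]
    · simp only [List.length_take, List.length_drop, List.length_cons] at *
      omega
  | case3 q qs L r hle ih =>
    have hb := pvBestRun_bounds ((q :: qs).drop (1 + pvRunLen q.2 qs))
    have hr := pvRunLen_le q.2 qs
    simp only [L, r] at hle ih
    simp only [get_longest_contiguous_path_alt, pvBestRun, if_neg hle, ih]
    rw [if_neg]
    · simp
    · simp only [List.length_take, List.length_drop, List.length_cons] at *
      omega

lemma bridge (l : List (Int × Int)) : ∀ (pre : List (Int × Int)) (st : Int × Int × Int × Int × Int × Int),
    (PySem.List.enumerate l (pre.length : Int)).foldl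
        (pvStepA (pre ++ l) (((pre ++ l).length : Nat) : Int)) st
      = pvLoopL (pre.length : Int) l st := by
  induction l with
  | nil => intro pre st; simp [PySem.List.enumerate_nil, pvLoopL]
  | cons p tail ih =>
    intro pre st
    obtain ⟨ml, ms, me, s0, e0, len⟩ := st
    rw [PySem.List.enumerate_cons, List.foldl_cons]
    cases tail with
    | nil =>
      have hcond : ((pre.length : Int) + 1 != ((pre ++ [p]).length : Int)) = false := by
        simp
      simp only [pvLoopL, pvStepA, pvClose, hcond, Bool.false_and]
      simp [PySem.List.enumerate_nil]
    | cons q qs =>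
      have hsplit : pre ++ p :: q :: qs = (pre ++ [p]) ++ q :: qs := by simp
      have hlen : (pre.length : Int) + 1 = (((pre ++ [p]).length : Nat) : Int) := by
        simp
      have hget : PySem.List.pyGet? (pre ++ p :: q :: qs) ((pre.length : Int) + 1) = some q := by
        rw [hsplit, hlen, PySem.List.pyGet?_append_length]
      have hcond : ((pre.length : Int) + 1 != (((pre ++ p :: q :: qs).length : Nat) : Int)) = true := by
        simp only [List.length_append, List.length_cons, bne_iff_ne]
        push_cast
        omega
      have ih' := ih (pre ++ [p])
      rw [hsplit]
      rw [show (((pre ++ [p]).length : Nat) : Int) = (pre.length : Int) + 1 by simp] at ih'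
      rw [ih']
      simp only [pvLoopL, pvStepA, pvClose]
      rw [show PySem.List.pyGet? ((pre ++ [p]) ++ q :: qs) ((pre.length : Int) + 1) = some q by
        rw [← hsplit]; exact hget]
      rw [← hsplit, hcond]
      simp only [Bool.true_and]
      by_cases hpq : p.2 + 1 = q.2
      · simp [hpq]
      · simp [hpq]

lemma loopL_run : ∀ (ps : List (Int × Int)) (p : Int × Int) (i start ml ms len : Int),
    len = i - start + 1 →
    pvLoopL i (p :: ps) (ml, ms, ms + ml - 1, start, i, len) =
      pvLoopL (i + (pvRunLen p.2 ps : Int) + 1) (ps.drop (pvRunLen p.2 ps))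
        (if len + (pvRunLen p.2 ps : Int) > ml
         then (len + (pvRunLen p.2 ps : Int), start, i + (pvRunLen p.2 ps : Int),
               i + (pvRunLen p.2 ps : Int) + 1, i + (pvRunLen p.2 ps : Int) + 1, 1)
         else (ml, ms, ms + ml - 1, i + (pvRunLen p.2 ps : Int) + 1,
               i + (pvRunLen p.2 ps : Int) + 1, 1)) := by
  intro ps
  induction ps with
  | nil =>
    intro p i start ml ms len hlen
    simp only [pvRunLen, pvLoopL, pvClose, List.drop_nil, Nat.cast_zero, add_zero]
  | cons q qs ih =>
    intro p i start ml ms len hlen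
    by_cases hq : q.2 = p.2 + 1
    · have hrl : pvRunLen p.2 (q :: qs) = 1 + pvRunLen q.2 qs := by
        simp [pvRunLen, hq]
      have hpq : p.2 + 1 = q.2 := hq.symm
      simp only [pvLoopL, if_pos hpq]
      rw [ih q (i + 1) start ml ms (len + 1) (by omega)]
      rw [hrl]
      rw [show (q :: qs).drop (1 + pvRunLen q.2 qs) = qs.drop (pvRunLen q.2 qs) by
        rw [Nat.add_comm, List.drop_succ_cons]]
      push_cast
      congr 1
      · ring
      · split_ifs with h1 h2 h2 <;> try (exfalso; omega)
        · simp only [Prod.mk.injEq]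
          and_intros <;> first | trivial | ring
        · simp only [Prod.mk.injEq]
          and_intros <;> first | trivial | ring
    · have hrl : pvRunLen p.2 (q :: qs) = 0 := by
        simp [pvRunLen, hq]
      have hpq : ¬ (p.2 + 1 = q.2) := fun h => hq h.symm
      simp only [pvLoopL, if_neg hpq, hrl, Nat.cast_zero, add_zero, List.drop_zero, pvClose]

lemma bestRun_cons_gt (q : Int × Int) (qs : List (Int × Int))
    (h : 1 + pvRunLen q.2 qs < (pvBestRun (qs.drop (pvRunLen q.2 qs))).2) :
    pvBestRun (q :: qs) =
      (1 + pvRunLen q.2 qs + (pvBestRun (qs.drop (pvRunLen q.2 qs))).1,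
       (pvBestRun (qs.drop (pvRunLen q.2 qs))).2) := by
  simp only [pvBestRun]
  rw [show (q :: qs).drop (1 + pvRunLen q.2 qs) = qs.drop (pvRunLen q.2 qs) by
    rw [Nat.add_comm, List.drop_succ_cons]]
  rw [if_pos h]

lemma bestRun_cons_le (q : Int × Int) (qs : List (Int × Int))
    (h : ¬ (1 + pvRunLen q.2 qs < (pvBestRun (qs.drop (pvRunLen q.2 qs))).2)) :
    pvBestRun (q :: qs) = (0, 1 + pvRunLen q.2 qs) := by
  simp only [pvBestRun]
  rw [show (q :: qs).drop (1 + pvRunLen q.2 qs) = qs.drop (pvRunLen q.2 qs) by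
    rw [Nat.add_comm, List.drop_succ_cons]]
  rw [if_neg h]

lemma loopL_boundary (l : List (Int × Int)) : ∀ (i ml ms : Int), 1 ≤ ml →
    pvFst3 (pvLoopL i l (ml, ms, ms + ml - 1, i, i, 1)) =
      (if ((pvBestRun l).2 : Int) > ml
       then (((pvBestRun l).2 : Int), i + ((pvBestRun l).1 : Int),
             i + ((pvBestRun l).1 : Int) + ((pvBestRun l).2 : Int) - 1)
       else (ml, ms, ms + ml - 1)) := by
  induction l using pvBestRun.induct with
  | case1 =>
    intro i ml ms hml
    simp only [pvBestRun, pvLoopL, pvFst3]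
    simp only [Nat.cast_zero]
    rw [if_neg (show ¬ ((0:Int) > ml) by omega)]
  | case2 q qs L r hgt ih =>
    intro i ml ms hml
    simp only [L, r] at hgt ih
    rw [show (q :: qs).drop (1 + pvRunLen q.2 qs) = qs.drop (pvRunLen q.2 qs) by
      rw [Nat.add_comm, List.drop_succ_cons]] at hgt ih
    rw [loopL_run qs q i i ml ms 1 (by omega)]
    rw [bestRun_cons_gt q qs hgt]
    set rl := pvRunLen q.2 qs with hrl
    set o' := (pvBestRun (qs.drop rl)).1 with ho'
    set l' := (pvBestRun (qs.drop rl)).2 with hl'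
    by_cases h1 : (1 : Int) + (rl : Int) > ml
    · rw [if_pos h1]
      have iha := ih (i + (rl : Int) + 1) (1 + (rl : Int)) i (by omega)
      rw [show (i + (1 + (rl : Int)) - 1 : Int) = i + (rl : Int) by ring] at iha
      rw [iha]
      rw [if_pos (by omega)]
      rw [if_pos (by omega)]
      simp only [Prod.mk.injEq]
      and_intros <;> push_cast <;> ring
    · rw [if_neg h1]
      have iha := ih (i + (rl : Int) + 1) ml ms hml
      rw [iha]
      by_cases h2 : ((l' : Nat) : Int) > ml
      · rw [if_pos h2, if_pos h2]
        simp only [Prod.mk.injEq]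
        and_intros <;> push_cast <;> ring
      · rw [if_neg h2, if_neg h2]
  | case3 q qs L r hle ih =>
    intro i ml ms hml
    simp only [L, r] at hle ih
    rw [show (q :: qs).drop (1 + pvRunLen q.2 qs) = qs.drop (pvRunLen q.2 qs) by
      rw [Nat.add_comm, List.drop_succ_cons]] at hle ih
    rw [loopL_run qs q i i ml ms 1 (by omega)]
    rw [bestRun_cons_le q qs hle]
    set rl := pvRunLen q.2 qs with hrl
    set o' := (pvBestRun (qs.drop rl)).1 with ho'
    set l' := (pvBestRun (qs.drop rl)).2 with hl'
    by_cases h1 : (1 : Int) + (rl : Int) > ml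
    · rw [if_pos h1]
      have iha := ih (i + (rl : Int) + 1) (1 + (rl : Int)) i (by omega)
      rw [show (i + (1 + (rl : Int)) - 1 : Int) = i + (rl : Int) by ring] at iha
      rw [iha]
      rw [if_neg (by omega)]
      rw [if_pos (by omega)]
      simp only [Prod.mk.injEq]
      and_intros <;> push_cast <;> ring
    · rw [if_neg h1]
      have iha := ih (i + (rl : Int) + 1) ml ms hml
      rw [iha]
      rw [if_neg (by omega)]
      rw [if_neg (by omega)]

-- ===== VERDICT (by name: the statement is the Claim_ definition above) =====
theorem get_longest_contiguous_path_spec : Claim_equal_get_longest_contiguous_path := by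
  intro path _hdom
  unfold Spec_get_longest_contiguous_path

  have hb := bridge path [] (1, 0, 0, 0, 0, 1)
  simp only [List.length_nil, Nat.cast_zero, List.nil_append] at hb
  have hfold : (PySem.List.enumerate path 0).foldl (pvStepA path (path.length : Int)) (1, 0, 0, 0, 0, 1)
      = pvLoopL 0 path (1, 0, 0, 0, 0, 1) := hb
  have hbd := loopL_boundary path 0 1 0 (by omega)
  rw [show ((0:Int) + 1 - 1) = 0 by ring] at hbd
  unfold get_longest_contiguous_path
  rw [hfold]
  rw [alt_eq_bestRun]
  set o := (pvBestRun path).1 with ho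
  set L := (pvBestRun path).2 with hL
  by_cases h : ((L : Nat) : Int) > 1
  · rw [if_pos h] at hbd
    have h1 : (pvLoopL 0 path (1, 0, 0, 0, 0, 1)).2.1 = ((o : Nat) : Int) := by
      have := congrArg (fun t => t.2.1) hbd
      simpa [pvFst3] using this
    have h2 : (pvLoopL 0 path (1, 0, 0, 0, 0, 1)).2.2.1 = ((o : Nat) : Int) + ((L : Nat) : Int) - 1 := by
      have := congrArg (fun t => t.2.2) hbd
      simpa [pvFst3] using this
    simp only [h1, h2]
    rw [show ((o : Nat) : Int) + ((L : Nat) : Int) - 1 + 1 = ((o : Nat) : Int) + ((L : Nat) : Int) by ring]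
    exact PySem.List.slice_natCast_add path o L
  · rw [if_neg h] at hbd
    have h1 : (pvLoopL 0 path (1, 0, 0, 0, 0, 1)).2.1 = (0 : Int) := by
      have := congrArg (fun t => t.2.1) hbd
      simpa [pvFst3] using this
    have h2 : (pvLoopL 0 path (1, 0, 0, 0, 0, 1)).2.2.1 = (0 : Int) := by
      have := congrArg (fun t => t.2.2) hbd
      simpa [pvFst3] using this
    simp only [h1, h2]
    rw [show ((0:Int) + 1) = ((1 : Nat) : Int) by simp]
    simp only [PySem.List.slice_zero_start]
    rw [PySem.List.slice_to_natCast]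
    cases path with
    | nil => simp
    | cons p ps =>
      simp only [o, L] at h ⊢
      have hpos := bestRun_len_pos p ps
      have hone : (pvBestRun (p :: ps)).2 = 1 := by omega
      rw [hone, bestRun_off_zero_of_len_one p ps (by omega), List.drop_zero]
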